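-- pv_equiv track=rewrite | github.com/WilliamOwens/AdventOfCode2022Python | Day06/main.py | solution
-- ===== SOURCE A (Python) =====
-- def solution(buffer, inputLength):
--   tempList = []
--   i=0
--   while i < len(buffer):
--     if buffer[i] not in tempList:
--       tempList.append(buffer[i])
--       i+=1
--       if len(tempList) == inputLength:
--         return i
--     else:
--       i= (i - len(tempList) + 1)
--       tempList = []
--       tempList.append(buffer[i])
--       i+=1
--   return -1
-- ===== SOURCE B (Python) =====
-- def solution(buffer, inputLength):
--   seen = set()
--   start = 0
--   for i, c in enumerate(buffer):
--     while c in seen: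
--       seen.discard(buffer[start])
--       start += 1
--     seen.add(c)
--     if i - start + 1 == inputLength:
--       return i + 1
--   return -1
-- ===== Notes on version B (the rewrite author's own statement) =====
-- stated objective: faster
-- what changed: Replaces A's backtracking rescan (reset the window list and re-read the buffer from start+1 on every repeat) with a one-pass sliding window over a set that advances the start pointer past the repeat, so no character is read more than twice.
import Mathlib
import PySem

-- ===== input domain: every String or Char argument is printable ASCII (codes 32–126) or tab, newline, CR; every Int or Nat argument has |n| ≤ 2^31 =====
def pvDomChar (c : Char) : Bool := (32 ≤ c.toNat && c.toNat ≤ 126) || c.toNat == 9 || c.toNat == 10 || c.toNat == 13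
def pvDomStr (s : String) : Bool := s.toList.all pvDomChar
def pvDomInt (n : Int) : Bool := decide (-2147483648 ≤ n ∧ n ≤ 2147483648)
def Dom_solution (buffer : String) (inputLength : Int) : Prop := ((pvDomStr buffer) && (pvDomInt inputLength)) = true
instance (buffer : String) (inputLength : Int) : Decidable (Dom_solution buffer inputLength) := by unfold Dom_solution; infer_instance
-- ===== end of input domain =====

-- B replaces A's backtracking rescan with a one-pass sliding window over a set; equal return value proved below.

-- ===== PORT A =====
-- A's while loop; every buffer[i] read is in range when reached (loop guard, and i-len+1 stays in [0,i]), so getD is exact.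
def solLoopA (cs : List Char) (L : Int) (i : Nat) (temp : List Char) : Int :=
  if h : i < cs.length then
    let c := cs.getD i ' '
    if c ∈ temp then
      -- i = (i - len(tempList) + 1); tempList = [buffer[i]]; i += 1
      let i2 := i - temp.length + 1
      solLoopA cs L (i2 + 1) [cs.getD i2 ' ']
    else
      -- tempList.append(buffer[i]); i += 1; if len(tempList) == inputLength: return i
      let temp' := temp ++ [c]
      if (temp'.length : Int) = L then ((i : Int) + 1)
      else solLoopA cs L (i + 1) temp'
  else -1
termination_by (cs.length - (i - temp.length), cs.length - i)
decreasing_by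
  · simp only [List.length_singleton]
    exact Prod.Lex.left _ _ (by omega)
  · simp only [List.length_append, List.length_singleton, Nat.succ_sub_succ]
    exact Prod.Lex.right _ (by omega)

def solution (buffer : String) (inputLength : Int) : Int :=
  solLoopA buffer.toList inputLength 0 []

-- ===== PORT B =====
-- inner `while c in seen: seen.discard(buffer[start]); start += 1`; fuel only makes the loop total (i - start bounds the iterations).
def solInnerB (cs : List Char) (c : Char) : Nat → Nat → PySem.Set Char → Nat × PySem.Set Char
  | 0, start, seen => (start, seen)
  | fuel + 1, start, seen =>
    if c ∈ seen then solInnerB cs c fuel (start + 1) (PySem.Set.discard seen (cs.getD start ' '))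
    else (start, seen)

-- outer `for i, c in enumerate(buffer)` loop of B
def solLoopB (cs : List Char) (L : Int) : List Char → Nat → Nat → PySem.Set Char → Int
  | [], _, _, _ => -1
  | c :: rest, i, start, seen =>
    let p := solInnerB cs c (i - start) start seen
    let seen2 := PySem.Set.add p.2 c
    if (i : Int) - (p.1 : Int) + 1 = L then (i : Int) + 1
    else solLoopB cs L rest (i + 1) p.1 seen2

def solution_alt (buffer : String) (inputLength : Int) : Int :=
  solLoopB buffer.toList inputLength buffer.toList 0 0 PySem.Set.empty

-- ===== PRECONDITION & SPEC =====
def Spec_solution (buffer : String) (inputLength : Int) (out : Int) : Prop := out = solution_alt buffer inputLength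
instance (buffer : String) (inputLength : Int) (out : Int) : Decidable (Spec_solution buffer inputLength out) := by unfold Spec_solution; infer_instance

-- ===== CLAIM (what is proved, stated in full; the proofs are below) =====
def Claim_equal_solution : Prop := ∀ (buffer : String) (inputLength : Int), Dom_solution buffer inputLength → Spec_solution buffer inputLength (solution buffer inputLength)

-- ===== LEMMAS AND PROOFS =====

-- window cs[s:t] of the buffer
def slice (cs : List Char) (s t : Nat) : List Char := (cs.drop s).take (t - s)

-- first s' ≥ s whose length-l window cs[s':s'+l] fits and has no repeat
def firstOk (cs : List Char) (l : Nat) (s : Nat) : Option Nat :=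
  if s + l ≤ cs.length then
    if (slice cs s (s + l)).Nodup then some s else firstOk cs l (s + 1)
  else none
termination_by cs.length + 1 - s
decreasing_by omega

-- the common answer: end position of the first distinct window, else -1
def res (cs : List Char) (l : Nat) (s : Nat) : Int :=
  match firstOk cs l s with
  | some t => (t : Int) + l
  | none => -1

lemma slice_nil (cs : List Char) (s t : Nat) (h : t ≤ s) : slice cs s t = [] := by
  simp [slice, Nat.sub_eq_zero_of_le h]

lemma slice_snoc (cs : List Char) (s t : Nat) (hst : s ≤ t) (htn : t < cs.length) :
    slice cs s (t + 1) = slice cs s t ++ [cs.getD t ' '] := by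
  unfold slice
  have h1 : t + 1 - s = (t - s) + 1 := by omega
  rw [h1, List.take_add_one, List.getElem?_drop]
  have h2 : s + (t - s) = t := by omega
  rw [h2, List.getElem?_eq_getElem htn]
  simp [List.getD, List.getElem?_eq_getElem htn]

lemma slice_cons (cs : List Char) (s t : Nat) (hst : s < t) (hsn : s < cs.length) :
    slice cs s t = cs.getD s ' ' :: slice cs (s + 1) t := by
  unfold slice
  rw [List.drop_eq_getElem_cons hsn]
  have h1 : t - s = (t - (s + 1)) + 1 := by omega
  rw [h1, List.take_succ_cons]
  simp [List.getD, List.getElem?_eq_getElem hsn]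

lemma slice_prefix (cs : List Char) (s t u : Nat) (h : t ≤ u) :
    slice cs s t <+: slice cs s u := by
  unfold slice
  exact List.take_prefix_take_left (by omega)

lemma not_nodup_slice_ext (cs : List Char) (s t u : Nat) (h : t ≤ u)
    (hnd : ¬ (slice cs s t).Nodup) : ¬ (slice cs s u).Nodup := by
  intro hc; exact hnd (hc.sublist (slice_prefix cs s t u h).sublist)

lemma firstOk_stop (cs : List Char) (l s : Nat) (h : cs.length < s + l) :
    firstOk cs l s = none := by
  rw [firstOk]; simp [Nat.not_le.mpr h]

lemma firstOk_found (cs : List Char) (l s : Nat) (h1 : s + l ≤ cs.length)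
    (h2 : (slice cs s (s + l)).Nodup) : firstOk cs l s = some s := by
  rw [firstOk]; simp [h1, h2]

lemma firstOk_succ (cs : List Char) (l s : Nat)
    (h : ¬ (s + l ≤ cs.length ∧ (slice cs s (s + l)).Nodup)) :
    firstOk cs l s = firstOk cs l (s + 1) := by
  by_cases h1 : s + l ≤ cs.length
  · have h2 : ¬ (slice cs s (s + l)).Nodup := fun hn => h ⟨h1, hn⟩
    rw [firstOk]; simp [h1, h2]
  · rw [firstOk_stop cs l s (by omega), firstOk_stop cs l (s + 1) (by omega)]

-- A's loop computes `res` from the current restart point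
lemma nodup_snoc (l : List Char) (c : Char) (h3 : l.Nodup) (hc : c ∉ l) : (l ++ [c]).Nodup := by
  rw [← List.concat_eq_append, List.nodup_concat]
  exact ⟨hc, h3⟩

lemma not_mem_of_nodup_snoc (l : List Char) (c : Char) (h : (l ++ [c]).Nodup) : c ∉ l := by
  rw [← List.concat_eq_append, List.nodup_concat] at h
  exact h.1

lemma loopA_eq (cs : List Char) (Lnat : Nat) (hL : 0 < Lnat) :
    ∀ (i : Nat) (temp : List Char) (start : Nat),
      i = start + temp.length → temp = slice cs start i → temp.Nodup → temp.length < Lnat →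
      solLoopA cs (Lnat : Int) i temp = res cs Lnat start := by
  intro i temp
  fun_induction solLoopA cs (Lnat : Int) i temp with
  | case1 i temp h c hc i2 ih =>
      intro start h1 h2 h3 h4
      have htne : temp ≠ [] := by rintro rfl; simp at hc
      have hlen1 : 1 ≤ temp.length := List.length_pos_iff.mpr htne
      have hi2 : i2 = start + 1 := by simp only [i2]; omega
      have hstartn : start + 1 < cs.length := by omega
      have step : solLoopA cs (Lnat : Int) (i2 + 1) [cs.getD i2 ' '] = res cs Lnat (start + 1) := by
        apply ih (start + 1)
        · simp [hi2]
        · rw [hi2, slice_cons cs (start + 1) (start + 2) (by omega) hstartn,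
              slice_nil cs (start + 2) (start + 2) (le_refl _)]
        · simp
        · simp; omega
      rw [step]
      have hnotok : ¬ (start + Lnat ≤ cs.length ∧ (slice cs start (start + Lnat)).Nodup) := by
        rintro ⟨hle, hnd⟩
        have hsn : slice cs start (i + 1) = temp ++ [c] := by
          rw [slice_snoc cs start i (by omega) h, ← h2]
        have hbad : ¬ (slice cs start (i + 1)).Nodup := by
          rw [hsn]
          intro hnn
          exact (List.disjoint_of_nodup_append hnn) hc (List.mem_cons_self)
        exact not_nodup_slice_ext cs start (i + 1) (start + Lnat) (by omega) hbad hnd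
      unfold res
      rw [firstOk_succ cs Lnat start hnotok]
  | case2 i temp h c hc temp' heq =>
      intro start h1 h2 h3 h4
      have hlen : temp.length + 1 = Lnat := by
        simp only [temp', List.length_append, List.length_singleton] at heq
        exact_mod_cast heq
      have hse : start + Lnat = i + 1 := by omega
      have hnd : (slice cs start (start + Lnat)).Nodup := by
        rw [hse, slice_snoc cs start i (by omega) h, ← h2]
        exact nodup_snoc temp c h3 hc
      unfold res
      rw [firstOk_found cs Lnat start (by omega) hnd]
      push_cast
      omega
  | case3 i temp h c hc temp' heq ih =>
      intro start h1 h2 h3 h4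
      have hlen : temp.length + 1 ≠ Lnat := by
        intro hh
        apply heq
        simp only [temp', List.length_append, List.length_singleton]
        exact_mod_cast hh
      apply ih start
      · simp [temp']; omega
      · rw [slice_snoc cs start i (by omega) h, ← h2]
      · exact nodup_snoc temp c h3 hc
      · simp [temp']; omega
  | case4 i temp h =>
      intro start h1 h2 h3 h4
      rw [res, firstOk_stop cs Lnat start (by omega)]

lemma loopA_neg (cs : List Char) (L : Int) (hL : L ≤ 0) :
    ∀ (i : Nat) (temp : List Char), solLoopA cs L i temp = -1 := by
  intro i temp
  fun_induction solLoopA cs L i temp with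
  | case1 i temp h c hc i2 ih => exact ih
  | case2 i temp h c hc temp' heq =>
      exfalso
      simp only [temp', List.length_append, List.length_singleton] at heq
      push_cast at heq
      omega
  | case3 i temp h c hc temp' heq ih => exact ih
  | case4 i temp h => rfl

-- B's inner while loop: advances start to just past the last conflict with c, keeping seen = the window's chars
lemma innerB_eq (cs : List Char) (c : Char) (i : Nat) (hin : i ≤ cs.length) :
    ∀ (fuel start : Nat) (seen : PySem.Set Char),
      fuel = i - start → start ≤ i →
      (∀ a, a ∈ seen ↔ a ∈ slice cs start i) → (slice cs start i).Nodup →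
      start ≤ (solInnerB cs c fuel start seen).1 ∧
      (solInnerB cs c fuel start seen).1 ≤ i ∧
      (∀ a, a ∈ (solInnerB cs c fuel start seen).2 ↔ a ∈ slice cs (solInnerB cs c fuel start seen).1 i) ∧
      c ∉ slice cs (solInnerB cs c fuel start seen).1 i ∧
      (∀ t, start ≤ t → t < (solInnerB cs c fuel start seen).1 → c ∈ slice cs t i) ∧
      (slice cs (solInnerB cs c fuel start seen).1 i).Nodup := by
  intro fuel
  induction fuel with
  | zero =>
      intro start seen hf hsi hmem hnd
      have hsie : start = i := by omega
      subst hsie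
      simp only [solInnerB]
      refine ⟨le_refl _, hsi, hmem, ?_, fun t ht1 ht2 => absurd (lt_of_le_of_lt ht1 ht2) (by omega), hnd⟩
      rw [slice_nil cs start start (le_refl _)]
      exact List.not_mem_nil
  | succ fuel ih =>
      intro start seen hf hsi hmem hnd
      by_cases hcs : c ∈ seen
      · have hci : c ∈ slice cs start i := (hmem c).mp hcs
        have hlt : start < i := by
          by_contra hge
          rw [slice_nil cs start i (by omega)] at hci
          exact List.not_mem_nil hci
        have hdecomp : slice cs start i = cs.getD start ' ' :: slice cs (start + 1) i :=
          slice_cons cs start i hlt (by omega)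
        have hnd' : (slice cs (start + 1) i).Nodup := by
          rw [hdecomp] at hnd; exact (List.nodup_cons.mp hnd).2
        have hd_notin : cs.getD start ' ' ∉ slice cs (start + 1) i := by
          rw [hdecomp] at hnd; exact (List.nodup_cons.mp hnd).1
        have hmem' : ∀ a, a ∈ PySem.Set.discard seen (cs.getD start ' ') ↔ a ∈ slice cs (start + 1) i := by
          intro a
          rw [PySem.Set.mem_discard, hmem a, hdecomp]
          constructor
          · rintro ⟨ha, hne⟩
            cases List.mem_cons.mp ha with
            | inl hh => exact absurd hh hne
            | inr hh => exact hh
          · intro ha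
            exact ⟨List.mem_cons_of_mem _ ha, fun hh => hd_notin (hh ▸ ha)⟩
        have step := ih (start + 1) (PySem.Set.discard seen (cs.getD start ' ')) (by omega) (by omega) hmem' hnd'
        simp only [solInnerB, if_pos hcs]
        refine ⟨by omega, step.2.1, step.2.2.1, step.2.2.2.1, ?_, step.2.2.2.2.2⟩
        intro t ht1 ht2
        rcases Nat.eq_or_lt_of_le ht1 with hte | hte
        · exact hte ▸ hci
        · exact step.2.2.2.2.1 t hte ht2
      · simp only [solInnerB, if_neg hcs]
        exact ⟨le_refl _, hsi, hmem, fun hh => hcs ((hmem c).mpr hh),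
          fun t ht1 ht2 => absurd ht1 (by omega), hnd⟩

-- B's outer loop computes `res` from the first window end not yet passed
lemma loopB_eq (cs : List Char) (Lnat : Nat) :
    ∀ (rest : List Char) (i start : Nat) (seen : PySem.Set Char),
      rest = cs.drop i → start ≤ i →
      (∀ a, a ∈ seen ↔ a ∈ slice cs start i) → (slice cs start i).Nodup →
      (∀ t, t < start → ¬ (slice cs t i).Nodup) → i - start < Lnat →
      solLoopB cs (Lnat : Int) rest i start seen = res cs Lnat (i + 1 - Lnat) := by
  intro rest
  induction rest with
  | nil =>
      intro i start seen hrest hsi hmem hnd hmin hlb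
      have hni : cs.length ≤ i := by
        have := List.drop_eq_nil_iff.mp hrest.symm
        omega
      rw [solLoopB, res, firstOk_stop cs Lnat (i + 1 - Lnat) (by omega)]
  | cons c rest' ih =>
      intro i start seen hrest hsi hmem hnd hmin hlb
      have hi : i < cs.length := by
        by_contra hge
        rw [List.drop_eq_nil_iff.mpr (by omega)] at hrest
        exact List.cons_ne_nil c rest' hrest
      have hdecomp : cs.drop i = cs.getD i ' ' :: cs.drop (i + 1) := by
        rw [List.drop_eq_getElem_cons hi]
        simp [List.getD, List.getElem?_eq_getElem hi]
      rw [hdecomp] at hrest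
      have hc : c = cs.getD i ' ' := (List.cons.injEq _ _ _ _ ▸ hrest).1
      have hrest' : rest' = cs.drop (i + 1) := (List.cons.injEq _ _ _ _ ▸ hrest).2
      obtain ⟨k1, k2, k3, k4, k5, k6⟩ :=
        innerB_eq cs c i (le_of_lt hi) (i - start) start seen rfl hsi hmem hnd
      set p := solInnerB cs c (i - start) start seen with hp
      have hsnoc : slice cs p.1 (i + 1) = slice cs p.1 i ++ [c] := by
        rw [slice_snoc cs p.1 i k2 hi, hc]
      have hnd' : (slice cs p.1 (i + 1)).Nodup := by
        rw [hsnoc]; exact nodup_snoc _ _ k6 k4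
      have hmin' : ∀ t, t < p.1 → ¬ (slice cs t (i + 1)).Nodup := by
        intro t ht
        by_cases htt : t < start
        · exact not_nodup_slice_ext cs t i (i + 1) (by omega) (hmin t htt)
        · have hcin := k5 t (by omega) ht
          rw [slice_snoc cs t i (by omega) hi]
          intro hnn
          exact (not_mem_of_nodup_snoc _ _ hnn) (hc ▸ hcin)
      have hmem'' : ∀ a, a ∈ PySem.Set.add p.2 c ↔ a ∈ slice cs p.1 (i + 1) := by
        intro a
        rw [PySem.Set.mem_add, k3, hsnoc, List.mem_append, List.mem_singleton]
      rw [solLoopB]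
      by_cases hif : (i : Int) - (p.1 : Int) + 1 = (Lnat : Int)
      · rw [if_pos hif]
        have hnat : i + 1 = p.1 + Lnat := by omega
        rw [show i + 1 - Lnat = p.1 from by omega]
        unfold res
        rw [firstOk_found cs Lnat p.1 (by omega)
          (by rw [show p.1 + Lnat = i + 1 from by omega]; exact hnd')]
        push_cast
        omega
      · rw [if_neg hif]
        have hne : i + 1 - p.1 ≠ Lnat := by intro hh; apply hif; omega
        have hlen' : (i + 1) - p.1 < Lnat := by omega
        rw [ih (i + 1) p.1 (PySem.Set.add p.2 c) hrest' (by omega) hmem'' hnd' hmin' (by omega)]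
        by_cases hbig : i + 2 ≤ Lnat
        · rw [show i + 1 - Lnat = 0 from by omega, show i + 2 - Lnat = 0 from by omega]
        · unfold res
          rw [firstOk_succ cs Lnat (i + 1 - Lnat) ?_, show (i + 1 - Lnat) + 1 = i + 2 - Lnat from by omega]
          rintro ⟨hle, hndd⟩
          have hlt : i + 1 - Lnat < p.1 := by omega
          apply hmin' (i + 1 - Lnat) hlt
          rw [show (i + 1 - Lnat) + Lnat = i + 1 from by omega] at hndd
          exact hndd

lemma loopB_neg (cs : List Char) (L : Int) (hL : L ≤ 0) :
    ∀ (rest : List Char) (i start : Nat) (seen : PySem.Set Char),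
      rest = cs.drop i → start ≤ i →
      (∀ a, a ∈ seen ↔ a ∈ slice cs start i) → (slice cs start i).Nodup →
      solLoopB cs L rest i start seen = -1 := by
  intro rest
  induction rest with
  | nil => intro i start seen _ _ _ _; rfl
  | cons c rest' ih =>
      intro i start seen hrest hsi hmem hnd
      have hi : i < cs.length := by
        by_contra hge
        rw [List.drop_eq_nil_iff.mpr (by omega)] at hrest
        exact List.cons_ne_nil c rest' hrest
      have hdecomp : cs.drop i = cs.getD i ' ' :: cs.drop (i + 1) := by
        rw [List.drop_eq_getElem_cons hi]
        simp [List.getD, List.getElem?_eq_getElem hi]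
      rw [hdecomp] at hrest
      have hc : c = cs.getD i ' ' := (List.cons.injEq _ _ _ _ ▸ hrest).1
      have hrest' : rest' = cs.drop (i + 1) := (List.cons.injEq _ _ _ _ ▸ hrest).2
      obtain ⟨k1, k2, k3, k4, k5, k6⟩ :=
        innerB_eq cs c i (le_of_lt hi) (i - start) start seen rfl hsi hmem hnd
      set p := solInnerB cs c (i - start) start seen with hp
      have hsnoc : slice cs p.1 (i + 1) = slice cs p.1 i ++ [c] := by
        rw [slice_snoc cs p.1 i k2 hi, hc]
      have hnd' : (slice cs p.1 (i + 1)).Nodup := by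
        rw [hsnoc]; exact nodup_snoc _ _ k6 k4
      have hmem'' : ∀ a, a ∈ PySem.Set.add p.2 c ↔ a ∈ slice cs p.1 (i + 1) := by
        intro a
        rw [PySem.Set.mem_add, k3, hsnoc, List.mem_append, List.mem_singleton]
      rw [solLoopB, if_neg (by rw [← hp]; omega)]
      exact ih (i + 1) p.1 (PySem.Set.add p.2 c) hrest' (by omega) hmem'' hnd'

-- ===== VERDICT (by name: the statement is the Claim_ definition above) =====
theorem solution_spec : Claim_equal_solution := by
  intro buffer L _
  unfold Spec_solution solution solution_alt
  set cs := buffer.toList with hcs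
  by_cases hL : 1 ≤ L
  · have hLn : L = ((L.toNat : Nat) : Int) := by omega
    have hpos : 0 < L.toNat := by omega
    rw [hLn]
    rw [loopA_eq cs L.toNat hpos 0 [] 0 rfl (by simp [slice]) (by simp) (by simpa using hpos)]
    rw [loopB_eq cs L.toNat cs 0 0 PySem.Set.empty rfl (le_refl 0)
      (by intro a; simp [PySem.Set.empty, slice]) (by simp [slice]) (by omega) (by simpa using hpos)]
    have : 0 + 1 - L.toNat = 0 := by omega
    rw [this]
  · push Not at hL
    rw [loopA_neg cs L (by omega) 0 [], loopB_neg cs L (by omega) cs 0 0 PySem.Set.empty rfl (le_refl 0)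
      (by intro a; simp [PySem.Set.empty, slice]) (by simp [slice])]
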